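-- pv_equiv track=rewrite | github.com/f20251321/assoc_games | gameOfCups.py | pool_after_attempts
-- ===== SOURCE A (Python) =====
-- INIT_WINNING   = 1
--
-- INIT_CURSED    = 1
--
-- INIT_CUPS      = 5
--
-- def pool_after_attempts(attempt_num):
--     #Calculate pool state after `attempt_num` empty picks.
--     w, c, cups = INIT_WINNING, INIT_CURSED, INIT_CUPS
--     for i in range(attempt_num):
--         if (i + 1) % 3 == 0:
--             c += 1
--         else:
--             w += 1
--         cups += 1
--     return w, c, cups
-- ===== SOURCE B (Python) =====
-- INIT_WINNING   = 1
-- INIT_CURSED    = 1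
-- INIT_CUPS      = 5
--
-- def pool_after_attempts(attempt_num):
--     # Closed form: among picks 1..n, every third adds a curse, the rest a win.
--     n = max(attempt_num, 0)
--     cursed_gain = n // 3
--     return INIT_WINNING + n - cursed_gain, INIT_CURSED + cursed_gain, INIT_CUPS + n
-- ===== Notes on version B (the rewrite author's own statement) =====
-- stated objective: faster
-- what changed: Replaced the per-attempt loop with closed-form arithmetic: cursed picks are counted directly as the number of multiples of three among the attempts, wins and cups follow arithmetically.
import Mathlib
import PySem

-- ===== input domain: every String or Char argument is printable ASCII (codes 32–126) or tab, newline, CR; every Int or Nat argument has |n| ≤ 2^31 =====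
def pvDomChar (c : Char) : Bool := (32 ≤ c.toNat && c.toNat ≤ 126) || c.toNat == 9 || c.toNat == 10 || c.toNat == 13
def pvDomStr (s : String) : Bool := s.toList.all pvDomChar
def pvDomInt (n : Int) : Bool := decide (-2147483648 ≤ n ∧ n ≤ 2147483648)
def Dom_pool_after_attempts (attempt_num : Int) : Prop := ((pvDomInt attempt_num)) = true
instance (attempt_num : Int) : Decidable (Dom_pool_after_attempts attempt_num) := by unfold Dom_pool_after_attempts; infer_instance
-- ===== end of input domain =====

-- B replaces A's per-attempt loop by closed-form arithmetic (n//3 cursed picks); objective: faster.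

-- ===== PORT A =====
def pool_after_attempts (attempt_num : Int) : List Int :=
  let s := (PySem.List.pyRange 0 attempt_num 1).foldl
    (fun (st : Int × Int × Int) i =>
      if PySem.Int.mod (i + 1) 3 = 0 then (st.1, st.2.1 + 1, st.2.2 + 1)
      else (st.1 + 1, st.2.1, st.2.2 + 1))
    (1, 1, 5)
  [s.1, s.2.1, s.2.2]

-- ===== PORT B =====
def pool_after_attempts_alt (attempt_num : Int) : List Int :=
  let n := max attempt_num 0
  let cursed_gain := PySem.Int.floordiv n 3
  [1 + n - cursed_gain, 1 + cursed_gain, 5 + n]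

-- ===== PRECONDITION & SPEC =====
def Spec_pool_after_attempts (attempt_num : Int) (out : List Int) : Prop := out = pool_after_attempts_alt attempt_num
instance (attempt_num : Int) (out : List Int) : Decidable (Spec_pool_after_attempts attempt_num out) := by unfold Spec_pool_after_attempts; infer_instance

-- ===== CLAIM (what is proved, stated in full; the proofs are below) =====
def Claim_equal_pool_after_attempts : Prop := ∀ (attempt_num : Int), Dom_pool_after_attempts attempt_num → Spec_pool_after_attempts attempt_num (pool_after_attempts attempt_num)

-- ===== LEMMAS AND PROOFS =====

-- closed form of A's loop on a natural number of attempts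
theorem pool_loop_closed (n : Nat) :
    (PySem.List.pyRange 0 (n : Int) 1).foldl
      (fun (st : Int × Int × Int) i =>
        if PySem.Int.mod (i + 1) 3 = 0 then (st.1, st.2.1 + 1, st.2.2 + 1)
        else (st.1 + 1, st.2.1, st.2.2 + 1))
      (1, 1, 5)
    = (1 + (n : Int) - (n : Int) / 3, 1 + (n : Int) / 3, 5 + (n : Int)) := by
  induction n with
  | zero => simp [PySem.List.pyRange_one_eq_nil]
  | succ m ih =>
      have h : (PySem.List.pyRange 0 ((m : Int) + 1) 1)
          = PySem.List.pyRange 0 (m : Int) 1 ++ [(m : Int)] :=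
        PySem.List.pyRange_one_succ_right (by positivity)
      have hmod : PySem.Int.mod ((m : Int) + 1) 3 = ((m : Int) + 1) % 3 :=
        PySem.Int.mod_eq_emod_of_pos (by norm_num)
      push_cast
      rw [h, List.foldl_append, ih, List.foldl_cons, List.foldl_nil, hmod]
      split_ifs with hc
      · have : ((m : Int) + 1) / 3 = (m : Int) / 3 + 1 := by omega
        simp [this]; omega
      · have : ((m : Int) + 1) / 3 = (m : Int) / 3 := by omega
        simp [this]; omega

-- ===== VERDICT (by name: the statement is the Claim_ definition above) =====
theorem pool_after_attempts_spec : Claim_equal_pool_after_attempts := by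
  intro a _
  unfold Spec_pool_after_attempts pool_after_attempts pool_after_attempts_alt
  by_cases ha : a ≤ 0
  · have h1 : PySem.List.pyRange 0 a 1 = [] := PySem.List.pyRange_one_eq_nil ha
    have h2 : max a 0 = 0 := by omega
    simp [h1, h2, PySem.Int.floordiv]
  · have h2 : max a 0 = a := by omega
    have hn : a = ((a.toNat : Nat) : Int) := by omega
    have hfd : PySem.Int.floordiv a 3 = a / 3 :=
      PySem.Int.floordiv_eq_ediv_of_pos (by norm_num)
    have key := pool_loop_closed a.toNat
    rw [← hn] at key
    simp only [h2, hfd, key]
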